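-- pv_equiv track=rewrite | github.com/charlielu05/scratchpad | PPEGE/ex_10_find_replace.py | findAndReplace
-- ===== SOURCE A (Python) =====
-- def findAndReplace(text:str, oldText:str, newText:str):
--     i = 0
--     replacedText = ''
--     while i < len(text):
--         if text[i:i + len(oldText)] == oldText:
--             replacedText += newText
--             i += len(oldText)
--         else:
--             replacedText += text[i]
--             i += 1
--
--     return replacedText
-- ===== SOURCE B (Python) =====
-- def findAndReplace(text, oldText, newText):
--     # Jump directly between occurrences with str.find instead of testing
--     # every position; requires non-empty oldText.
--     parts = []
--     rest = text
--     while True: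
--         j = rest.find(oldText)
--         if j == -1:
--             parts.append(rest)
--             break
--         parts.append(rest[:j])
--         parts.append(newText)
--         rest = rest[j + len(oldText):]
--     return ''.join(parts)
-- ===== Notes on version B (the rewrite author's own statement) =====
-- stated objective: faster
-- what changed: B jumps between occurrences with str.find and joins the collected pieces at the end, instead of A's char-by-char index loop that tests a fresh slice at every position and grows the result by string concatenation.
-- outside the precondition, e.g. on findAndReplace('', '', 'x'): A returns '', B does not finish within the time limit
import Mathlib
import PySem

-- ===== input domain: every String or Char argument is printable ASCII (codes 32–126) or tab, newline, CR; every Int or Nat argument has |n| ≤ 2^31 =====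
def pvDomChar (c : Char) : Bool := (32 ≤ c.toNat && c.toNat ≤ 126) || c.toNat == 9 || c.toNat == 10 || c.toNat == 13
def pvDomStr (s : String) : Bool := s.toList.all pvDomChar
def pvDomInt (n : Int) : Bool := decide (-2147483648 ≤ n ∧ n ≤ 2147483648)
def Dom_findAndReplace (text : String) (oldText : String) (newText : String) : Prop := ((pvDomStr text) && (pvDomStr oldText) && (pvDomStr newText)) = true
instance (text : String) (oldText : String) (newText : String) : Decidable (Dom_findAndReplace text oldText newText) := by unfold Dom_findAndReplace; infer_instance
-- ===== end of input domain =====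

-- B replaces A's position-by-position slice-test loop by find-based jumps between
-- occurrences, collecting pieces and joining once at the end (objective: faster).

-- ===== PORT A =====
-- A's while loop over index i; fuel bounds the iteration count (each step advances
-- i by ≥ 1 when oldText ≠ "", the only case Pre_ admits).
def findAndReplaceGoA (text old new : List Char) : Nat → Nat → List Char → List Char
  | 0, _, acc => acc
  | fuel + 1, i, acc =>
    if i < text.length then
      if PySem.List.slice text (some (i : Int)) (some ((i : Int) + (old.length : Int))) = old then
        findAndReplaceGoA text old new fuel (i + old.length) (acc ++ new)
      else
        findAndReplaceGoA text old new fuel (i + 1) (acc ++ [PySem.List.pyGetD text (i : Int) ' '])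
    else acc

def findAndReplace (text : String) (oldText : String) (newText : String) : String :=
  String.ofList (findAndReplaceGoA text.toList oldText.toList newText.toList (text.toList.length + 1) 0 [])

-- ===== PORT B =====
-- B's while loop: find the next occurrence in the remaining suffix, emit the gap and
-- the replacement, drop past it; fuel bounds the iterations (rest shrinks each step).
def findAndReplaceGoB (old new : List Char) : Nat → List Char → List (List Char) → List (List Char)
  | 0, _, parts => parts
  | fuel + 1, rest, parts =>
    let j := PySem.Chars.find rest old
    if j = -1 then parts ++ [rest]
    else
      findAndReplaceGoB old new fuel
        (PySem.List.slice rest (some (j + (old.length : Int))) none)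
        (parts ++ [PySem.List.slice rest none (some j), new])

def findAndReplace_alt (text : String) (oldText : String) (newText : String) : String :=
  String.ofList (PySem.Chars.join []
    (findAndReplaceGoB oldText.toList newText.toList (text.toList.length + 1) text.toList []))

-- ===== PRECONDITION & SPEC =====
-- Pre_ excludes empty oldText: there A's loop never advances (it diverges on any
-- non-empty text, and its '' on empty text is the empty-pattern corner nobody
-- specifies), and B's find-loop likewise diverges.
def Pre_findAndReplace (text : String) (oldText : String) (newText : String) : Prop :=
  oldText ≠ ""

instance (text : String) (oldText : String) (newText : String) : Decidable (Pre_findAndReplace text oldText newText) := by unfold Pre_findAndReplace; infer_instance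

def pvWitness_findAndReplace : String × String × String := ("abcabd", "ab", "XY")

def Spec_findAndReplace (text : String) (oldText : String) (newText : String) (out : String) : Prop := out = findAndReplace_alt text oldText newText
instance (text : String) (oldText : String) (newText : String) (out : String) : Decidable (Spec_findAndReplace text oldText newText out) := by unfold Spec_findAndReplace; infer_instance

-- ===== CLAIM (what is proved, stated in full; the proofs are below) =====
def Claim_equal_findAndReplace : Prop := ∀ (text : String) (oldText : String) (newText : String), Dom_findAndReplace text oldText newText → Pre_findAndReplace text oldText newText → Spec_findAndReplace text oldText newText (findAndReplace text oldText newText)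

-- ===== LEMMAS AND PROOFS =====

-- Reference recursion: left-to-right non-overlapping replacement on char lists.
def repl (old new : List Char) : List Char → List Char
  | [] => []
  | c :: t =>
    if old.isPrefixOf (c :: t) then new ++ repl old new (t.drop (old.length - 1))
    else c :: repl old new t
termination_by l => l.length
decreasing_by
  · simp
  · simp

theorem repl_nil (old new : List Char) : repl old new [] = [] := by simp [repl]

theorem repl_match (old new l : List Char) (hne : old ≠ []) (hp : old <+: l) :
    repl old new l = new ++ repl old new (l.drop old.length) := by
  cases l with
  | nil =>
    exact absurd (List.prefix_nil.mp hp) hne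
  | cons c t =>
    rw [repl, if_pos ((List.isPrefixOf_iff_prefix).mpr hp)]
    obtain ⟨n, hn⟩ : ∃ n, old.length = n + 1 := by
      have := List.length_pos_iff.mpr hne
      exact ⟨old.length - 1, by omega⟩
    congr 1
    rw [hn, List.drop_succ_cons]
    norm_num

theorem repl_nomatch (old new : List Char) (c : Char) (t : List Char)
    (hp : ¬ old <+: (c :: t)) : repl old new (c :: t) = c :: repl old new t := by
  rw [repl, if_neg (fun h => hp ((List.isPrefixOf_iff_prefix).mp h))]

theorem repl_of_not_infix (old new : List Char) (l : List Char)
    (h : ¬ old <:+: l) : repl old new l = l := by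
  induction l with
  | nil => exact repl_nil old new
  | cons c t ih =>
    rw [repl_nomatch old new c t (fun hp => h hp.isInfix)]
    rw [ih (fun hi => h (hi.trans (List.suffix_cons c t).isInfix))]

theorem repl_split (old new : List Char) (hne : old ≠ []) :
    ∀ (j : Nat) (l : List Char), (∀ i < j, ¬ old <+: l.drop i) → old <+: l.drop j →
    repl old new l = l.take j ++ new ++ repl old new (l.drop (j + old.length)) := by
  intro j
  induction j with
  | zero =>
    intro l _ hp
    simp only [List.drop_zero] at hp
    simp [repl_match old new l hne hp]
  | succ j ih =>
    intro l hmin hp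
    cases l with
    | nil => simp at hp; exact (hne hp).elim
    | cons c t =>
      have h0 : ¬ old <+: (c :: t) := by
        have := hmin 0 (Nat.succ_pos j); simpa using this
      rw [repl_nomatch old new c t h0]
      have hmin' : ∀ i < j, ¬ old <+: t.drop i := by
        intro i hi
        have := hmin (i + 1) (by omega)
        simpa using this
      have hp' : old <+: t.drop j := by simpa using hp
      rw [ih t hmin' hp']
      simp [List.take_succ_cons]
      rw [show j + 1 + old.length = (j + old.length) + 1 by omega, List.drop_succ_cons]

-- A's loop computes repl on the remaining suffix.
theorem goA_eq (text old new : List Char) (hne : old ≠ []) :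
    ∀ (fuel i : Nat) (acc : List Char), text.length ≤ fuel + i →
    findAndReplaceGoA text old new fuel i acc = acc ++ repl old new (text.drop i) := by
  intro fuel
  induction fuel with
  | zero =>
    intro i acc h
    rw [findAndReplaceGoA, List.drop_eq_nil_of_le (by omega), repl_nil, List.append_nil]
  | succ fuel ih =>
    intro i acc h
    rw [findAndReplaceGoA]
    by_cases hi : i < text.length
    · rw [if_pos hi]
      have hslice : PySem.List.slice text (some (i : Int)) (some ((i : Int) + (old.length : Int))) =
          (text.drop i).take old.length := by
        exact PySem.List.slice_natCast_add text i old.length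
      have hiff : ((text.drop i).take old.length = old) ↔ old <+: text.drop i := by
        constructor
        · intro he
          exact he ▸ List.take_prefix old.length (text.drop i)
        · intro hp
          have := List.prefix_iff_eq_take.mp hp
          exact this.symm
      by_cases hm : old <+: text.drop i
      · rw [if_pos (hslice ▸ hiff.mpr hm)]
        have hlen := List.length_pos_iff.mpr hne
        rw [ih (i + old.length) (acc ++ new) (by omega)]
        rw [repl_match old new (text.drop i) hne hm]
        simp [List.drop_drop]
      · rw [if_neg (by rw [hslice]; exact fun he => hm (hiff.mp he))]
        rw [ih (i + 1) _ (by omega)]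
        have hget : PySem.List.pyGetD text (i : Int) ' ' = text[i] := by
          rw [PySem.List.pyGetD_natCast]
          exact List.getD_eq_getElem text ' ' hi
        have hdrop : text.drop i = text[i] :: text.drop (i + 1) := List.drop_eq_getElem_cons hi
        rw [hdrop, repl_nomatch old new _ _ (by rw [← hdrop]; exact hm), hget]
        simp
    · rw [if_neg hi]
      rw [List.drop_eq_nil_of_le (by omega), repl_nil, List.append_nil]

theorem join_nil_append (parts : List (List Char)) (x : List Char) :
    PySem.Chars.join [] (parts ++ [x]) = PySem.Chars.join [] parts ++ x := by
  induction parts with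
  | nil => simp [PySem.Chars.join_nil, PySem.Chars.join_singleton]
  | cons p ps ih =>
    cases ps with
    | nil => simp [PySem.Chars.join_singleton, PySem.Chars.join_cons_cons]
    | cons q qs =>
      simp only [List.cons_append, PySem.Chars.join_cons_cons]
      simp only [List.cons_append] at ih
      rw [ih]
      simp

-- B's loop, joined, also computes repl on the remaining suffix.
theorem goB_eq (old new : List Char) (hne : old ≠ []) :
    ∀ (fuel : Nat) (rest : List Char) (parts : List (List Char)), rest.length < fuel →
    PySem.Chars.join [] (findAndReplaceGoB old new fuel rest parts) =
      PySem.Chars.join [] parts ++ repl old new rest := by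
  intro fuel
  induction fuel with
  | zero => intro rest parts h; omega
  | succ fuel ih =>
    intro rest parts h
    rw [findAndReplaceGoB]
    by_cases hj : PySem.Chars.find rest old = -1
    · simp only [hj, if_true]
      rw [join_nil_append,
        repl_of_not_infix old new rest ((PySem.Chars.find_eq_neg_one_iff rest old).mp hj)]
    · simp only [if_neg hj]
      have hnn : 0 ≤ PySem.Chars.find rest old := by
        have := PySem.Chars.neg_one_le_find rest old; omega
      obtain ⟨hp, hmin⟩ := PySem.Chars.find_spec (s := rest) (sub := old) hnn
      set j : Nat := (PySem.Chars.find rest old).toNat with hjdef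
      have hjcast : PySem.Chars.find rest old = (j : Int) := by omega
      have hrest : rest ≠ [] := by
        intro h0
        subst h0
        simp at hp
        exact hne hp
      have hlen := List.length_pos_iff.mpr hne
      have hjlt : j < rest.length := by
        by_contra hge
        rw [List.drop_eq_nil_of_le (by omega)] at hp
        exact hne (List.prefix_nil.mp hp)
      have hdropslice : PySem.List.slice rest (some (PySem.Chars.find rest old + (old.length : Int))) none
          = rest.drop (j + old.length) := by
        rw [hjcast, show ((j : Int) + (old.length : Int)) = ((j + old.length : Nat) : Int) by push_cast; ring]
        exact PySem.List.slice_from_natCast rest (j + old.length)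
      have htakeslice : PySem.List.slice rest none (some (PySem.Chars.find rest old)) = rest.take j := by
        rw [hjcast]; exact PySem.List.slice_to_natCast rest j
      rw [hdropslice, htakeslice]
      rw [ih (rest.drop (j + old.length)) _ (by simp; omega)]
      rw [show parts ++ [List.take j rest, new] = (parts ++ [List.take j rest]) ++ [new] by simp]
      rw [join_nil_append, join_nil_append]
      rw [repl_split old new hne j rest (fun i hi => hmin i hi) hp]
      simp

theorem findAndReplace_eq (text oldText newText : String) (hne : oldText ≠ "") :
    findAndReplace text oldText newText = findAndReplace_alt text oldText newText := by
  have hne' : oldText.toList ≠ [] := by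
    simpa using hne
  unfold findAndReplace findAndReplace_alt
  rw [goA_eq text.toList oldText.toList newText.toList hne' (text.toList.length + 1) 0 [] (by omega)]
  rw [goB_eq oldText.toList newText.toList hne' (text.toList.length + 1) text.toList [] (by omega)]
  rw [PySem.Chars.join_nil]
  simp

-- ===== VERDICT (by name: the statement is the Claim_ definition above) =====
theorem findAndReplace_spec : Claim_equal_findAndReplace := by
  intro text oldText newText _ hpre
  exact findAndReplace_eq text oldText newText hpre
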